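-- pv_equiv track=rewrite | github.com/persadaramiiza/TugasBesar-Daspro | src/F12 - Shop Management.py | fungsisplit
-- ===== SOURCE A (Python) =====
-- def fungsisplit(bariscsv):
--     fields=[] #inisialisasi list kosong
--     field='' #inisialisasi string kosong
--     for baris in bariscsv: #loop melalui setiap baris pada csv
--         for karakter in baris: #loop melalui setiap karakter pada baris
--             if karakter==';':  # Jika karakter adalah titik koma, tambahkan field saat ini ke dalam list fields
--                 fields.append(field)
--                 field=''
--             else:
--                 field+=karakter  # Tambahkan karakter ke dalam field saat ini
--         if field.endswith('\n'):
--             field=field[:-1]  # Jika field berakhir dengan newline, hilangkan newline tersebut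
--         fields.append(field)
--         field=''
--     return fields
-- ===== SOURCE B (Python) =====
-- def fungsisplit(bariscsv):
--     fields = []
--     for baris in bariscsv:
--         parts = baris.split(';')
--         if parts[-1].endswith('\n'):
--             parts[-1] = parts[-1][:-1]
--         fields.extend(parts)
--     return fields
-- ===== Notes on version B (the rewrite author's own statement) =====
-- stated objective: idiomatic
-- what changed: Replaced the explicit character-by-character loop with a string accumulator by str.split(';') per line plus a single trailing-newline trim of the last field, extending the result list once per line.
import Mathlib
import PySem

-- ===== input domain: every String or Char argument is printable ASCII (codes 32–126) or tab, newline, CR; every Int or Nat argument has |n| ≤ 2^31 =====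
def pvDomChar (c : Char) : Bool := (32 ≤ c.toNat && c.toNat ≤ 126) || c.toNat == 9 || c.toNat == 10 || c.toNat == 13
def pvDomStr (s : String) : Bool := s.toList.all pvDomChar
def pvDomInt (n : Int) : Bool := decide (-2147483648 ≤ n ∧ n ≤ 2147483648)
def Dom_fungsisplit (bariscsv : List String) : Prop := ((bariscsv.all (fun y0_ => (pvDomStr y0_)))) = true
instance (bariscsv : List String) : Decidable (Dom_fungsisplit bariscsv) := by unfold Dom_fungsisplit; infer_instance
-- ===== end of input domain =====

-- B replaces A's character-by-character accumulator loop with per-line str.split(';')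
-- plus a trailing-newline trim of the last field only (objective: more idiomatic, same cost).

-- ===== PORT A =====
def fungsisplit (bariscsv : List String) : List String :=
  (bariscsv.foldl
    (fun (st : List String × String) (baris : String) =>
      let st2 := baris.toList.foldl
        (fun (st : List String × String) (karakter : Char) =>
          if karakter = ';' then (st.1 ++ [st.2], "") else (st.1, st.2.push karakter)) st
      let field := if PySem.Str.endswith st2.2 "\n"
                   then PySem.Str.slice st2.2 none (some (-1)) else st2.2
      (st2.1 ++ [field], ""))
    ([], "")).1

-- ===== PORT B =====
def fungsisplit_alt (bariscsv : List String) : List String :=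
  bariscsv.foldl
    (fun (fields : List String) (baris : String) =>
      let parts := (PySem.Chars.splitOn baris.toList [';']).map String.ofList
      let lastF := parts.getLast!
      let lastF' := if PySem.Str.endswith lastF "\n"
                    then PySem.Str.slice lastF none (some (-1)) else lastF
      fields ++ parts.dropLast ++ [lastF']) []

-- ===== PRECONDITION & SPEC =====
def Spec_fungsisplit (bariscsv : List String) (out : List String) : Prop := out = fungsisplit_alt bariscsv
instance (bariscsv : List String) (out : List String) : Decidable (Spec_fungsisplit bariscsv out) := by unfold Spec_fungsisplit; infer_instance

-- ===== CLAIM (what is proved, stated in full; the proofs are below) =====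
def Claim_equal_fungsisplit : Prop := ∀ (bariscsv : List String), Dom_fungsisplit bariscsv → Spec_fungsisplit bariscsv (fungsisplit bariscsv)

-- ===== LEMMAS AND PROOFS =====

/-- Split a char list on ';' into (completed fields, last field). -/
def splitP : List Char → List (List Char) × List Char
  | [] => ([], [])
  | x :: xs =>
    let r := splitP xs
    if x = ';' then ([] :: r.1, r.2)
    else match r.1 with
      | [] => ([], x :: r.2)
      | p :: ps => ((x :: p) :: ps, r.2)

/-- `splitP`'s parts with a prefix `c` glued onto the first one. -/
def withHead (c : List Char) (r : List (List Char) × List Char) : List (List Char) :=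
  match r.1 with
  | [] => [c ++ r.2]
  | p :: ps => ((c ++ p) :: ps) ++ [r.2]

lemma withHead_nil (r : List (List Char) × List Char) : withHead [] r = r.1 ++ [r.2] := by
  cases h : r.1 <;> simp [withHead, h]

lemma go_spec (l : List Char) : ∀ (fuel : Nat), l.length ≤ fuel → ∀ (cur : List Char) (acc : List (List Char)),
    PySem.Chars.splitOn.go [';'] fuel l cur acc = acc.reverse ++ withHead cur.reverse (splitP l) := by
  induction l with
  | nil =>
    intro fuel _ cur acc
    rw [PySem.Chars.splitOn.go.eq_def]
    cases fuel <;> simp [withHead, splitP]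
  | cons x xs ih =>
    intro fuel hf cur acc
    cases fuel with
    | zero => simp at hf
    | succ g =>
      rw [PySem.Chars.splitOn.go.eq_def]
      by_cases hx : x = ';'
      · subst hx
        have hpre : List.isPrefixOf [';'] (';' :: xs) = true := by simp [List.isPrefixOf]
        simp only [hpre, if_true, List.length_cons, List.length_nil, List.drop_succ_cons,
          List.drop_zero]
        rw [ih g (by simp at hf; omega) [] (cur.reverse :: acc)]
        cases h : (splitP xs).1 <;>
          simp [withHead, splitP, h, List.reverse_cons]
      · have hpre : List.isPrefixOf [';'] (x :: xs) = false := by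
          simp [List.isPrefixOf]; intro h; exact absurd h.symm hx
        simp only [hpre, Bool.false_eq_true, if_false]
        rw [ih g (by simp at hf; omega) (x :: cur) acc]
        have : withHead (x :: cur).reverse (splitP xs) = withHead cur.reverse (splitP (x :: xs)) := by
          cases h : (splitP xs).1 <;> simp [withHead, splitP, h, hx]
        rw [this]

lemma splitOn_semi (l : List Char) :
    PySem.Chars.splitOn l [';'] = (splitP l).1 ++ [(splitP l).2] := by
  rw [PySem.Chars.splitOn]
  rw [go_spec l (l.length + 1) (by omega) [] []]
  simp [withHead_nil]

lemma splitP_nosemi (g : List Char) (h : ';' ∉ g) : splitP g = ([], g) := by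
  induction g with
  | nil => simp [splitP]
  | cons y ys ih =>
    have hy : y ≠ ';' := fun hy => h (hy ▸ List.mem_cons_self)
    have := ih (fun hm => h (List.mem_cons_of_mem _ hm))
    simp [splitP, hy, this]

lemma splitP_append (g : List Char) (l : List Char) (h : ';' ∉ g) :
    splitP (g ++ ';' :: l) = (g :: (splitP l).1, (splitP l).2) := by
  induction g with
  | nil => simp [splitP]
  | cons y ys ih =>
    have hy : y ≠ ';' := fun hy => h (hy ▸ List.mem_cons_self)
    have := ih (fun hm => h (List.mem_cons_of_mem _ hm))
    simp [splitP, hy, this]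

lemma innerA (l : List Char) : ∀ (fs : List String) (f : String), ';' ∉ f.toList →
    l.foldl (fun (st : List String × String) (karakter : Char) =>
        if karakter = ';' then (st.1 ++ [st.2], "") else (st.1, st.2.push karakter)) (fs, f)
    = (fs ++ ((splitP (f.toList ++ l)).1).map String.ofList,
       String.ofList (splitP (f.toList ++ l)).2) := by
  induction l with
  | nil =>
    intro fs f h
    simp [splitP_nosemi f.toList h]
  | cons x xs ih =>
    intro fs f h
    by_cases hx : x = ';'
    · subst hx
      rw [List.foldl_cons, if_pos rfl]
      rw [ih (fs ++ [f]) "" (by simp)]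
      rw [show (f.toList ++ ';' :: xs) = f.toList ++ ';' :: xs from rfl, splitP_append f.toList xs h]
      simp
    · rw [List.foldl_cons, if_neg hx]
      rw [ih fs (f.push x) (by simp [String.toList_push]; exact ⟨h, fun hh => hx hh.symm⟩)]
      simp [String.toList_push]

lemma getLast!_cons_cons (x y : String) (l : List String) :
    (x :: y :: l).getLast! = (y :: l).getLast! := by
  simp [List.getLast!, List.getLast]

lemma getLast!_concat (xs : List String) (a : String) : (xs ++ [a]).getLast! = a := by
  induction xs with
  | nil => rfl
  | cons y ys ih =>
    obtain ⟨z, zs, hz⟩ : ∃ z zs, ys ++ [a] = z :: zs := by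
      cases ys <;> exact ⟨_, _, rfl⟩
    rw [List.cons_append, hz, getLast!_cons_cons, ← hz, ih]

lemma main_fold (bs : List String) : ∀ (fs : List String),
    (bs.foldl
      (fun (st : List String × String) (baris : String) =>
        let st2 := baris.toList.foldl
          (fun (st : List String × String) (karakter : Char) =>
            if karakter = ';' then (st.1 ++ [st.2], "") else (st.1, st.2.push karakter)) st
        let field := if PySem.Str.endswith st2.2 "\n"
                     then PySem.Str.slice st2.2 none (some (-1)) else st2.2
        (st2.1 ++ [field], "")) (fs, "")).1
    = bs.foldl
      (fun (fields : List String) (baris : String) =>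
        let parts := (PySem.Chars.splitOn baris.toList [';']).map String.ofList
        let lastF := parts.getLast!
        let lastF' := if PySem.Str.endswith lastF "\n"
                      then PySem.Str.slice lastF none (some (-1)) else lastF
        fields ++ parts.dropLast ++ [lastF']) fs := by
  induction bs with
  | nil => intro fs; rfl
  | cons b rest ih =>
    intro fs
    simp only [List.foldl_cons]
    rw [innerA b.toList fs "" (by simp)]
    rw [ih]
    congr 1
    rw [splitOn_semi b.toList]
    simp only [List.map_append, List.map_cons, List.map_nil, List.dropLast_concat,
      getLast!_concat, List.nil_append, String.toList_empty]

-- ===== VERDICT (by name: the statement is the Claim_ definition above) =====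
theorem fungsisplit_spec : Claim_equal_fungsisplit := by
  intro bariscsv _
  unfold Spec_fungsisplit fungsisplit fungsisplit_alt
  exact main_fold bariscsv []
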